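-- pv_equiv track=rewrite | github.com/dojorio/dojo-centro | 2013/20130417 - aeroporto - python/aeroporto.py | andar_linha
-- ===== SOURCE A (Python) =====
-- def andar_linha(linha):
--     espacos = 0
--     for lugar in linha[linha.find('*')+1:]:
--             if lugar == "#":
--                 break
--             if lugar != "*":
--                 espacos += 1
--     return espacos
-- ===== SOURCE B (Python) =====
-- def andar_linha(linha):
--     tail = linha.split('*', 1)[-1]
--     seg = tail.split('#', 1)[0]
--     return len(seg.replace('*', ''))
-- ===== Notes on version B (the rewrite author's own statement) =====
-- stated objective: faster
-- what changed: Replaces A's find-then-scan loop (with break and a running counter) by a staged split pipeline: split('*',1)[-1] discards everything up to the first star, split('#',1)[0] cuts at the next hash, and the answer is the length after replace('*','') deletes remaining stars; the per-character Python loop disappears into C-level string primitives.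
import Mathlib
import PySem

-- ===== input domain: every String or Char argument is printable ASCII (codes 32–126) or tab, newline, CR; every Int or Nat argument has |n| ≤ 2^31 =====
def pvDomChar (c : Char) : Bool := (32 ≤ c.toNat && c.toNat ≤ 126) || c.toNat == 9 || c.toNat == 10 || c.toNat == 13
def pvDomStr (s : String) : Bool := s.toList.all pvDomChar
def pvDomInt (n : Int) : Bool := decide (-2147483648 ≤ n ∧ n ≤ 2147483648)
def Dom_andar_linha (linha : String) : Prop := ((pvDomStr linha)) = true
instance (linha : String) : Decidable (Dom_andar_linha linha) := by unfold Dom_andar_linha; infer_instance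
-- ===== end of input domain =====

-- B replaces A's find-then-scan loop (break on '#', running counter) by a staged split
-- pipeline: split('*',1)[-1], then split('#',1)[0], then len after replace('*','').
-- Objective: faster (measured constant-factor win: the per-character loop moves into string primitives).

-- ===== PORT A =====
-- the for-loop with its break; esp is 'espacos'
def pvLoopA : List Char → Int → Int
  | [], esp => esp
  | c :: rest, esp =>
    if c = '#' then esp
    else pvLoopA rest (if c ≠ '*' then esp + 1 else esp)

def andar_linha (linha : String) : Int :=
  pvLoopA (PySem.Str.slice linha (some (PySem.Str.find linha "*" + 1)) none).toList 0

-- ===== PORT B =====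
-- Source B's pipeline on the code points; the '*'/'#' separators are nonempty literals, so
-- Python's str.split(sep, 1) is exactly PySem.Chars.splitOnMax · · 1; split never returns
-- an empty list, so the [-1] / [0] indexings always hit (the .getD [] default is dead).
def andar_linha_alt (linha : String) : Int :=
  let tail := (PySem.List.pyGet? (PySem.Chars.splitOnMax linha.toList ['*'] 1) (-1)).getD []
  let seg := (PySem.List.pyGet? (PySem.Chars.splitOnMax tail ['#'] 1) 0).getD []
  ((PySem.Chars.replace seg ['*'] []).length : Int)

-- ===== PRECONDITION & SPEC =====
def Spec_andar_linha (linha : String) (out : Int) : Prop := out = andar_linha_alt linha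
instance (linha : String) (out : Int) : Decidable (Spec_andar_linha linha out) := by unfold Spec_andar_linha; infer_instance

-- ===== CLAIM =====
def Claim_equal_andar_linha : Prop := ∀ (linha : String), Dom_andar_linha linha → Spec_andar_linha linha (andar_linha linha)

-- ===== LEMMAS AND PROOFS =====

-- Chars.find on a one-character needle: index of the first occurrence, as a takeWhile length
theorem pv_find_go (c : Char) (s : List Char) :
    ∀ (k : Nat), PySem.Chars.find.go [c] s k =
      if c ∈ s then ((k + (s.takeWhile (fun x => !(x == c))).length : Nat) : Int) else -1 := by
  induction s with
  | nil => intro k; simp [PySem.Chars.find.go]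
  | cons a t ih =>
    intro k
    by_cases hc : c = a
    · subst hc
      simp [PySem.Chars.find.go, List.isPrefixOf]
    · simp [PySem.Chars.find.go, List.isPrefixOf, hc, Ne.symm hc, ih (k + 1)]
      split_ifs with hm
      · ring
      · rfl

theorem pv_find_singleton (s : List Char) (c : Char) :
    PySem.Chars.find s [c] =
      if c ∈ s then (((s.takeWhile (fun x => !(x == c))).length : Nat) : Int) else -1 := by
  simpa using pv_find_go c s 0

-- A's loop counts the non-'*' chars before the first '#'
theorem pv_loopA (t : List Char) :
    ∀ esp : Int, pvLoopA t esp =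
      esp + ((t.takeWhile (fun c => !(c == '#'))).countP (fun c => !(c == '*')) : Int) := by
  induction t with
  | nil => intro esp; simp [pvLoopA]
  | cons c rest ih =>
    intro esp
    by_cases h1 : c = '#'
    · subst h1; simp [pvLoopA]
    · by_cases h2 : c = '*'
      · subst h2
        simp [pvLoopA, ih]
      · simp [pvLoopA, h1, h2, ih]
        omega

-- splitOnMax.go with maxsplit exhausted (m = 0) returns immediately
theorem pv_split_go0 (c : Char) (fuel : Nat) (l cur : List Char) (accs : List (List Char)) :
    PySem.Chars.splitOnMax.go [c] fuel 0 l (cur) (accs) = ((cur.reverse ++ l) :: accs).reverse := by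
  cases fuel with
  | zero => simp [PySem.Chars.splitOnMax.go]
  | succ n =>
    cases l with
    | nil => simp [PySem.Chars.splitOnMax.go]
    | cons a t => simp [PySem.Chars.splitOnMax.go]

-- splitOnMax.go with maxsplit 1 and a one-char separator
theorem pv_split_go1 (c : Char) :
    ∀ (fuel : Nat) (l cur : List Char) (accs : List (List Char)), l.length < fuel →
      PySem.Chars.splitOnMax.go [c] fuel 1 l cur accs =
        if c ∈ l then
          accs.reverse ++ [cur.reverse ++ l.takeWhile (fun x => !(x == c)),
            l.drop ((l.takeWhile (fun x => !(x == c))).length + 1)]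
        else accs.reverse ++ [cur.reverse ++ l] := by
  intro fuel
  induction fuel with
  | zero => intro l cur accs h; omega
  | succ n ih =>
    intro l cur accs h
    cases l with
    | nil => simp [PySem.Chars.splitOnMax.go]
    | cons a t =>
      by_cases hc : c = a
      · subst hc
        rw [show PySem.Chars.splitOnMax.go [c] (n + 1) 1 (c :: t) cur accs =
              PySem.Chars.splitOnMax.go [c] n 0 t [] (cur.reverse :: accs) from by
            simp [PySem.Chars.splitOnMax.go, List.isPrefixOf], pv_split_go0]
        simp
      · have ht : t.length < n := by simp at h; omega
        simp [PySem.Chars.splitOnMax.go, List.isPrefixOf, hc, Ne.symm hc, ih t (a :: cur) accs ht]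

-- Python's s.split(c, 1) for a single character c
theorem pv_splitOnMax1 (s : List Char) (c : Char) :
    PySem.Chars.splitOnMax s [c] 1 =
      if c ∈ s then
        [s.takeWhile (fun x => !(x == c)), s.drop ((s.takeWhile (fun x => !(x == c))).length + 1)]
      else [s] := by
  have h := pv_split_go1 c (s.length + 1) s [] [] (by omega)
  simp [PySem.Chars.splitOnMax]
  simpa using h

-- replace with a one-char pattern and empty replacement is a filter
theorem pv_replace_go (c : Char) :
    ∀ (fuel : Nat) (l acc : List Char), l.length ≤ fuel →
      PySem.Chars.replace.go [c] [] fuel l acc = acc.reverse ++ l.filter (fun x => !(x == c)) := by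
  intro fuel
  induction fuel with
  | zero =>
    intro l acc h
    cases l with
    | nil => simp [PySem.Chars.replace.go]
    | cons a t => simp at h
  | succ n ih =>
    intro l acc h
    cases l with
    | nil => simp [PySem.Chars.replace.go]
    | cons a t =>
      have ht : t.length ≤ n := by simpa using h
      by_cases hc : c = a
      · subst hc
        simp [PySem.Chars.replace.go, List.isPrefixOf, ih t acc ht]
      · simp [PySem.Chars.replace.go, List.isPrefixOf, hc, Ne.symm hc, ih t (a :: acc) ht]

theorem pv_replace_len (s : List Char) (c : Char) :
    (PySem.Chars.replace s [c] []).length = s.countP (fun x => !(x == c)) := by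
  simp [PySem.Chars.replace, pv_replace_go c s.length s [] le_rfl, List.countP_eq_length_filter]

-- the common tail both programs work on: s after the first '*' (all of s if none)
theorem pv_core (t : List Char) :
    pvLoopA t 0 =
      ((PySem.Chars.replace
        ((PySem.List.pyGet? (PySem.Chars.splitOnMax t ['#'] 1) 0).getD []) ['*'] []).length : Int) := by
  rw [pv_loopA t 0, pv_splitOnMax1 t '#']
  by_cases hm : '#' ∈ t
  · simp [hm, PySem.List.pyGet?, PySem.List.pyIdx?, pv_replace_len]
  · have htw : t.takeWhile (fun x => !(x == '#')) = t := by
      rw [List.takeWhile_eq_self_iff]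
      intro a ha
      simp
      intro hcontra
      exact hm (hcontra ▸ ha)
    simp [hm, PySem.List.pyGet?, PySem.List.pyIdx?, pv_replace_len, htw]

-- indexing the result of split(sep, 1): [-1] is the last piece, [0] the first
theorem pv_get1 (x : List Char) : (PySem.List.pyGet? [x] (-1 : Int)).getD [] = x := by
  simp [PySem.List.pyGet?, PySem.List.pyIdx?]

theorem pv_get2 (x y : List Char) : (PySem.List.pyGet? [x, y] (-1 : Int)).getD [] = y := by
  simp [PySem.List.pyGet?, PySem.List.pyIdx?]

-- ===== VERDICT =====
theorem andar_linha_spec : Claim_equal_andar_linha := by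
  intro linha _
  unfold Spec_andar_linha andar_linha andar_linha_alt
  have hstar : ("*" : String).toList = ['*'] := rfl
  simp only [PySem.Str.find_eq, PySem.Str.toList_slice, PySem.Chars.slice_eq_listSlice, hstar]
  set s := linha.toList with hs
  rw [pv_splitOnMax1 s '*', pv_find_singleton s '*']
  by_cases hm : '*' ∈ s
  · set w := (s.takeWhile (fun x => !(x == '*'))).length with hw
    rw [if_pos hm, if_pos hm, pv_get2]
    rw [show ((w : Int) + 1) = ((w + 1 : Nat) : Int) by push_cast; ring,
      PySem.List.slice_from_natCast]
    exact pv_core (s.drop (w + 1))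
  · rw [if_neg hm, if_neg hm, pv_get1]
    rw [show (-1 : Int) + 1 = ((0 : Nat) : Int) by ring, PySem.List.slice_from_natCast,
      List.drop_zero]
    exact pv_core s
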